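-- pv_equiv track=rewrite | github.com/jluby127/AstroQ | helperFunctions.py | reorderAllocation
-- ===== SOURCE A (Python) =====
-- def reorderAllocation(nSlotsInNight, An, AvailableSlotsInTheNight):
--     nSlotsInQuarter = int(nSlotsInNight/4)
--     extra = AvailableSlotsInTheNight%4
--
--     # if extra is not 0, then we have extra slots that are available, but might not be full usable.
--     # this is because we must have the same number of slots in each quarter.
--     # so depending on extra, we may add or subtract available slots
--     # and then we must adjust the daytime bands before and after accordingly.
--
--     # Ultimately the goal is to have a 1D list of length equal to nSlotsInNight
--     # where first X and last X slots are 0 by default because they are twilight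
--     # and the middle Y slots (Y is divisable by 4) are either 0 or 1 based on
--     # weather the quarter is allocated to the telescope or not.
--     edgeadd1 = 0
--     edgeadd2 = 0
--     if extra == 0:
--         edge = int((nSlotsInNight - AvailableSlotsInTheNight)/2)
--     if extra == 1:
--         edge = int((nSlotsInNight - AvailableSlotsInTheNight)/2)
--         AvailableSlotsInTheNight -= 1
--         edgeadd1 = 1
--     if extra == 2:
--         edge = int((nSlotsInNight - AvailableSlotsInTheNight)/2)
--         AvailableSlotsInTheNight += 2
--         edgeadd1 = -1
--         edgeadd2 = -1
--     if extra == 3: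
--         edge = int((nSlotsInNight - AvailableSlotsInTheNight)/2)
--         AvailableSlotsInTheNight += 1
--         edgeadd1 = -1
--
--     AvailableSlotsInTheQuarter = AvailableSlotsInTheNight/4
--
--     allomap1 = [0]*(edge + edgeadd1)
--     allomap2 = [0]*((edge+1) + edgeadd2) #the +1 is to account for the python indexing starting at zero
--     allomap3 = [0]*AvailableSlotsInTheNight
--
--     for i in range(len(An)):
--         if An[i] == 1:
--             start = i*int(AvailableSlotsInTheQuarter)
--             stop = start + int(AvailableSlotsInTheQuarter)
--             for j in range(start, stop):
--                 allomap3[j] = 1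
--
--     allallomap = allomap1 + allomap3 + allomap2
--     return allallomap
-- ===== SOURCE B (Python) =====
-- def reorderAllocation(nSlotsInNight, An, AvailableSlotsInTheNight):
--     # Per-position closed-form: each output slot's value is computed directly
--     # from its index (which quarter it falls in), instead of building and
--     # concatenating zero lists and writing ones block by block.
--     extra = AvailableSlotsInTheNight % 4
--     edge = int((nSlotsInNight - AvailableSlotsInTheNight) / 2)
--     avail = AvailableSlotsInTheNight + (0, -1, 2, 1)[extra]
--     head = max(edge + (0, 1, -1, -1)[extra], 0)
--     tail = max(edge + 1 + (-1 if extra == 2 else 0), 0)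
--     q = avail // 4
--     total = head + max(avail, 0) + tail
--
--     def val(k):
--         m = k - head
--         if m < 0 or m >= avail or q <= 0:
--             return 0
--         i = m // q
--         return 1 if i < len(An) and An[i] == 1 else 0
--
--     return [val(k) for k in range(total)]
-- ===== Notes on version B (the rewrite author's own statement) =====
-- stated objective: alternative
-- what changed: B computes the whole map as a single comprehension over output positions, each slot's value derived in closed form from its index (quarter index = (k-head)//q looked up in An), instead of A's three concatenated zero lists with a nested loop writing ones block by block.
-- outside the precondition, e.g. on reorderAllocation(8, [1, 1, 1, 1, 1], 8): A raises IndexError, B returns [1, 1, 1, 1, 1, 1, 1, 1, 0]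
import Mathlib
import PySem

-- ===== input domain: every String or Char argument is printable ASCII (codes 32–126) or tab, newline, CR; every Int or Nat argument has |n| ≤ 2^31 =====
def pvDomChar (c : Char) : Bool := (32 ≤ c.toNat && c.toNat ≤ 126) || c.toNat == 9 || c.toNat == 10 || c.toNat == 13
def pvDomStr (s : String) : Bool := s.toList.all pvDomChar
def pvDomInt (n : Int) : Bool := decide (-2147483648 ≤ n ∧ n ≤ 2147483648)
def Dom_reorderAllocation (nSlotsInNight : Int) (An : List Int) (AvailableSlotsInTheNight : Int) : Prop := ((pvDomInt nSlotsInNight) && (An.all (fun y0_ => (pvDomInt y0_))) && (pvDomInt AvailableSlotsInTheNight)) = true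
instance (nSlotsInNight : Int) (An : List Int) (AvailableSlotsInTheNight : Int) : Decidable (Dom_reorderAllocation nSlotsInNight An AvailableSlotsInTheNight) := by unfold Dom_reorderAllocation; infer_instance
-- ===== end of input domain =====

-- B computes each output slot's value in closed form from its index (one map over
-- positions), instead of A's three concatenated zero lists with a nested write loop
-- (objective: alternative).

-- ===== PORT A =====
-- A's quarter-filling loop (the `for i in range(len(An))` / `for j in range(start, stop)` nest), extracted as a named helper
def pvFillA (An : List Int) (allomap3 : List Int) (AQ : Int) : List Int :=
  (PySem.List.pyRange 0 (PySem.List.len An) 1).foldl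
    (fun acc i =>
      if PySem.List.pyGetD An i 0 = 1 then
        (PySem.List.pyRange (i * AQ) (i * AQ + AQ) 1).foldl
          (fun a j => PySem.List.pySetD a j 1) acc
      else acc)
    allomap3

def reorderAllocation (nSlotsInNight : Int) (An : List Int) (AvailableSlotsInTheNight : Int) : List Int :=
  let _nSlotsInQuarter := PySem.Int.truncdiv nSlotsInNight 4  -- computed and never used, as in A
  let extra := PySem.Int.mod AvailableSlotsInTheNight 4
  -- A's four sequential `if extra == k:` blocks; exactly one fires since 0 ≤ extra < 4.
  -- `edge` is the same expression in all four blocks (computed before AvailableSlotsInTheNight is adjusted).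
  let edge := PySem.Int.truncdiv (nSlotsInNight - AvailableSlotsInTheNight) 2  -- int((...)/2), exact on Dom
  let (avail, edgeadd1, edgeadd2) :=
    if extra = 0 then (AvailableSlotsInTheNight, 0, 0)
    else if extra = 1 then (AvailableSlotsInTheNight - 1, 1, 0)
    else if extra = 2 then (AvailableSlotsInTheNight + 2, -1, -1)
    else (AvailableSlotsInTheNight + 1, -1, 0)
  let AQ := PySem.Int.truncdiv avail 4  -- int(AvailableSlotsInTheQuarter), exact on Dom
  let allomap1 := List.replicate (edge + edgeadd1).toNat (0 : Int)
  let allomap2 := List.replicate (edge + 1 + edgeadd2).toNat (0 : Int)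
  let allomap3 := List.replicate avail.toNat (0 : Int)
  allomap1 ++ pvFillA An allomap3 AQ ++ allomap2

-- ===== PORT B =====
-- B's per-position value function `val(k)`
def pvVal (An : List Int) (head avail q : Int) (k : Int) : Int :=
  -- `m = k - head` inlined
  if k - head < 0 ∨ avail ≤ k - head ∨ q ≤ 0 then 0
  else if PySem.Int.floordiv (k - head) q < (An.length : Int) ∧
          PySem.List.pyGetD An (PySem.Int.floordiv (k - head) q) 0 = 1 then 1 else 0

def reorderAllocation_alt (nSlotsInNight : Int) (An : List Int) (AvailableSlotsInTheNight : Int) : List Int :=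
  let extra := PySem.Int.mod AvailableSlotsInTheNight 4
  let edge := PySem.Int.truncdiv (nSlotsInNight - AvailableSlotsInTheNight) 2
  let avail := AvailableSlotsInTheNight +
    (if extra = 0 then 0 else if extra = 1 then -1 else if extra = 2 then 2 else 1)
  let head := max (edge + (if extra = 0 then 0 else if extra = 1 then 1 else -1)) 0
  let tail := max (edge + 1 + (if extra = 2 then -1 else 0)) 0
  let q := PySem.Int.floordiv avail 4
  let total := head + max avail 0 + tail
  (PySem.List.pyRange 0 total 1).map (pvVal An head avail q)

-- ===== PRECONDITION & SPEC =====
-- Pre_ excludes exactly the inputs on which A raises IndexError: when the per-quarter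
-- size q is positive and some flagged quarter's slot range runs past the end of allomap3.
def Pre_reorderAllocation (nSlotsInNight : Int) (An : List Int) (AvailableSlotsInTheNight : Int) : Prop :=
  let extra := PySem.Int.mod AvailableSlotsInTheNight 4
  let adj := if extra = 0 then 0 else if extra = 1 then -1 else if extra = 2 then 2 else 1
  let avail := AvailableSlotsInTheNight + adj
  let q := PySem.Int.floordiv avail 4
  q ≤ 0 ∨ ∀ i : Nat, i < An.length → An[i]! = 1 → ((i : Int) + 1) * q ≤ avail

instance (nSlotsInNight : Int) (An : List Int) (AvailableSlotsInTheNight : Int) : Decidable (Pre_reorderAllocation nSlotsInNight An AvailableSlotsInTheNight) := by unfold Pre_reorderAllocation; infer_instance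

def pvWitness_reorderAllocation : Int × List Int × Int := (8, ([1, 0, 1, 0] : List Int), 8)

def Spec_reorderAllocation (nSlotsInNight : Int) (An : List Int) (AvailableSlotsInTheNight : Int) (out : List Int) : Prop := out = reorderAllocation_alt nSlotsInNight An AvailableSlotsInTheNight
instance (nSlotsInNight : Int) (An : List Int) (AvailableSlotsInTheNight : Int) (out : List Int) : Decidable (Spec_reorderAllocation nSlotsInNight An AvailableSlotsInTheNight out) := by unfold Spec_reorderAllocation; infer_instance

-- ===== CLAIM (what is proved, stated in full; the proofs are below) =====
def Claim_equal_reorderAllocation : Prop := ∀ (nSlotsInNight : Int) (An : List Int) (AvailableSlotsInTheNight : Int), Dom_reorderAllocation nSlotsInNight An AvailableSlotsInTheNight → Pre_reorderAllocation nSlotsInNight An AvailableSlotsInTheNight → Spec_reorderAllocation nSlotsInNight An AvailableSlotsInTheNight (reorderAllocation nSlotsInNight An AvailableSlotsInTheNight)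

-- ===== LEMMAS AND PROOFS =====

lemma pv_foldl_fix {α β : Type} (f : α → β → α) (L : List β) (acc : α)
    (h : ∀ a b, f a b = a) : L.foldl f acc = acc := by
  induction L generalizing acc with
  | nil => rfl
  | cons b L ih => simp [List.foldl_cons, h, ih]

lemma pv_fill_eq (qn : Nat) : ∀ (s : Nat) (acc : List Int), s + qn ≤ acc.length →
    (PySem.List.pyRange (s : Int) ((s : Int) + (qn : Int)) 1).foldl
      (fun a j => PySem.List.pySetD a j 1) acc
    = acc.take s ++ List.replicate qn 1 ++ acc.drop (s + qn) := by
  induction qn with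
  | zero =>
    intro s acc h
    simp [List.take_append_drop]
  | succ qn ih =>
    intro s acc h
    rw [PySem.List.pyRange_one_cons (by push_cast; omega)]
    rw [List.foldl_cons, PySem.List.pySetD_natCast]
    have hrange : (PySem.List.pyRange ((s : Int) + 1) ((s : Int) + ((qn : Nat) + 1 : Nat)) 1)
        = PySem.List.pyRange ((s + 1 : Nat) : Int) (((s + 1 : Nat) : Int) + (qn : Int)) 1 := by
      congr 1 <;> push_cast <;> ring
    rw [hrange, ih (s + 1) (acc.set s 1) (by simp; omega)]
    have hset : acc.set s 1 = acc.take s ++ 1 :: acc.drop (s + 1) := by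
      rw [List.set_eq_take_append_cons_drop]
      simp
      omega
    rw [hset]
    have hs : s ≤ acc.length := by omega
    rw [List.take_append, List.drop_append]
    have h1 : List.drop (s + 1 + qn) (List.take s acc) = [] :=
      List.drop_eq_nil_of_le (by simp [hs]; omega)
    have h2 : s + 1 + qn - s = qn + 1 := by omega
    simp [List.length_take, List.take_take, hs, h1, h2, List.drop_drop, List.replicate_succ]
    omega

lemma pv_fill_len (L : List Int) (acc : List Int) :
    (L.foldl (fun a j => PySem.List.pySetD a j 1) acc).length = acc.length := by
  induction L generalizing acc with
  | nil => rfl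
  | cons j L ih => rw [List.foldl_cons, ih, PySem.List.length_pySetD]

lemma pv_fold_len (An : List Int) (q : Int) (R : List Int) (acc : List Int) :
    (R.foldl (fun acc i =>
      if PySem.List.pyGetD An i 0 = 1 then
        (PySem.List.pyRange (i * q) (i * q + q) 1).foldl
          (fun a j => PySem.List.pySetD a j 1) acc
      else acc) acc).length = acc.length := by
  induction R generalizing acc with
  | nil => rfl
  | cons i R ih =>
    rw [List.foldl_cons]
    by_cases h : PySem.List.pyGetD An i 0 = 1
    · simp only [h, if_true]; rw [ih, pv_fill_len]
    · simp only [h, if_false]; exact ih acc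

-- element of one quarter's fill
lemma pv_fill_get (s qn : Nat) (acc : List Int) (hsq : s + qn ≤ acc.length)
    (m : Nat) (hm : m < acc.length) :
    ((PySem.List.pyRange (s : Int) ((s : Int) + (qn : Int)) 1).foldl
      (fun a j => PySem.List.pySetD a j 1) acc)[m]! =
    if s ≤ m ∧ m < s + qn then 1 else acc[m]! := by
  rw [pv_fill_eq qn s acc hsq]
  have hls : (acc.take s).length = s := by simp; omega
  by_cases h1 : m < s
  · have : (acc.take s ++ List.replicate qn 1 ++ acc.drop (s + qn))[m]! = acc[m]! := by
      rw [List.append_assoc, getElem!_pos _ m (by simp; omega), getElem!_pos _ m hm,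
        List.getElem_append_left (by omega), List.getElem_take]
    rw [this, if_neg (by omega)]
  · by_cases h2 : m < s + qn
    · rw [if_pos (by omega), List.append_assoc,
        getElem!_pos _ m (by simp; omega),
        List.getElem_append_right (by omega)]
      rw [List.getElem_append_left (by simp [hls]; omega)]
      rw [List.getElem_replicate]
    · rw [if_neg (by omega), List.append_assoc,
        getElem!_pos _ m (by simp; omega),
        List.getElem_append_right (by omega), getElem!_pos _ m hm]
      have h3 : m - (acc.take s).length - qn < (acc.drop (s + qn)).length := by
        simp [hls]; omega
      rw [List.getElem_append_right (by simp [hls]; omega)]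
      simp only [hls, List.length_replicate, List.getElem_drop]
      congr 1
      omega

-- element of the outer fold: 1 exactly on flagged quarters' blocks
lemma pv_fold_get (An : List Int) (q : Int) (hq : 0 < q) :
    ∀ (R : List Int) (acc : List Int) (m : Nat), m < acc.length →
    (∀ j ∈ R, PySem.List.pyGetD An j 0 = 1 → 0 ≤ j ∧ j * q + q ≤ (acc.length : Int)) →
    (R.foldl (fun acc i =>
      if PySem.List.pyGetD An i 0 = 1 then
        (PySem.List.pyRange (i * q) (i * q + q) 1).foldl
          (fun a j => PySem.List.pySetD a j 1) acc
      else acc) acc)[m]! =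
    if ∃ j ∈ R, PySem.List.pyGetD An j 0 = 1 ∧ j * q ≤ (m : Int) ∧ (m : Int) < j * q + q
    then 1 else acc[m]! := by
  intro R
  induction R with
  | nil => intro acc m hm _; simp
  | cons i R ih =>
    intro acc m hm hb
    rw [List.foldl_cons]
    by_cases hg : PySem.List.pyGetD An i 0 = 1
    · simp only [hg, if_true]
      obtain ⟨hi0, hib⟩ := hb i List.mem_cons_self hg
      set s : Nat := (i * q).toNat with hs
      set qn : Nat := q.toNat with hqn
      have hcast1 : i * q = ((s : Nat) : Int) := by
        have : 0 ≤ i * q := mul_nonneg hi0 (le_of_lt hq)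
        omega
      have hcast2 : q = ((qn : Nat) : Int) := by omega
      have hsq : s + qn ≤ acc.length := by omega
      have hfe : (PySem.List.pyRange (i * q) (i * q + q) 1).foldl
          (fun a j => PySem.List.pySetD a j 1) acc
          = acc.take s ++ List.replicate qn 1 ++ acc.drop (s + qn) := by
        rw [hcast1, hcast2]; exact pv_fill_eq qn s acc hsq
      have hlen : (acc.take s ++ List.replicate qn 1 ++ acc.drop (s + qn)).length
          = acc.length := by simp [List.length_take, List.length_drop]; omega
      rw [hfe, ih _ m (by omega)
        (fun j hj hgj => by rw [hlen]; exact hb j (List.mem_cons_of_mem _ hj) hgj)]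
      have hgetm : (acc.take s ++ List.replicate qn 1 ++ acc.drop (s + qn))[m]!
          = if s ≤ m ∧ m < s + qn then 1 else acc[m]! := by
        rw [← hfe]
        rw [hcast1, hcast2] at hfe ⊢
        exact pv_fill_get s qn acc hsq m hm
      rw [hgetm]
      by_cases hR : ∃ j ∈ R, PySem.List.pyGetD An j 0 = 1 ∧ j * q ≤ (m : Int) ∧ (m : Int) < j * q + q
      · rw [if_pos hR, if_pos ⟨_, List.mem_cons_of_mem _ hR.choose_spec.1,
          hR.choose_spec.2⟩]
      · rw [if_neg hR]
        by_cases hblk : s ≤ m ∧ m < s + qn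
        · rw [if_pos ⟨hblk.1, hblk.2⟩, if_pos ⟨i, List.mem_cons_self, hg, by omega, by omega⟩]
        · rw [if_neg hblk, if_neg]
          rintro ⟨j, hj, hgj, hlo, hhi⟩
          rcases List.mem_cons.mp hj with rfl | hj'
          · exact hblk ⟨by omega, by omega⟩
          · exact hR ⟨j, hj', hgj, hlo, hhi⟩
    · simp only [hg, if_false]
      rw [ih acc m hm (fun j hj hgj => hb j (List.mem_cons_of_mem _ hj) hgj)]
      congr 1
      simp only [eq_iff_iff]
      constructor
      · rintro ⟨j, hj, hp⟩; exact ⟨j, List.mem_cons_of_mem _ hj, hp⟩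
      · rintro ⟨j, hj, hp⟩
        rcases List.mem_cons.mp hj with rfl | hj'
        · exact absurd hp.1 hg
        · exact ⟨j, hj', hp⟩

lemma pv_core (An : List Int) (h t avail : Int) (hdvd : (4 : Int) ∣ avail)
    (hpre : PySem.Int.floordiv avail 4 ≤ 0 ∨
      ∀ i : Nat, i < An.length → An[i]! = 1 → ((i : Int) + 1) * PySem.Int.floordiv avail 4 ≤ avail) :
    List.replicate h.toNat (0 : Int)
      ++ pvFillA An (List.replicate avail.toNat 0) (PySem.Int.truncdiv avail 4)
      ++ List.replicate t.toNat 0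
    = (PySem.List.pyRange 0 (max h 0 + max avail 0 + max t 0) 1).map
        (pvVal An (max h 0) avail (PySem.Int.floordiv avail 4)) := by
  have hfd : PySem.Int.floordiv avail 4 = avail / 4 :=
    PySem.Int.floordiv_eq_ediv_of_pos (by norm_num)
  have htd : PySem.Int.truncdiv avail 4 = avail / 4 := by
    show Int.tdiv avail 4 = avail / 4
    exact Int.tdiv_eq_ediv_of_dvd hdvd
  have h4 : avail / 4 * 4 = avail := Int.ediv_mul_cancel hdvd
  rw [htd, hfd]
  by_cases hq : 0 < avail / 4
  · -- positive quarter size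
    have havail : 0 < avail := by nlinarith
    have hLacc : (List.replicate avail.toNat (0 : Int)).length = avail.toNat :=
      List.length_replicate
    have hfoldlen : (pvFillA An (List.replicate avail.toNat 0) (avail / 4)).length
        = avail.toNat := by
      unfold pvFillA; rw [pv_fold_len, hLacc]
    apply List.ext_getElem
    · simp only [List.length_append, List.length_replicate, List.length_map,
        PySem.List.length_pyRange_one, hfoldlen]
      omega
    · intro k hk1 hk2
      have hkR : k < (max h 0 + max avail 0 + max t 0 - 0).toNat := by
        simpa [PySem.List.length_pyRange_one] using hk2
      rw [List.getElem_map, PySem.List.getElem_pyRange_one]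
      rw [← getElem!_pos _ k hk1]
      unfold pvVal
      simp only [zero_add]
      rw [List.append_assoc] at hk1 ⊢
      by_cases hk : k < h.toNat
      · -- head zeros
        rw [getElem!_pos _ k (by simpa using hk1), List.getElem_append_left
          (by simp; omega), List.getElem_replicate, if_pos (Or.inl (by omega))]
      · by_cases hkm : k < h.toNat + avail.toNat
        · -- middle
          obtain ⟨m, hmdef⟩ : ∃ m : Nat, m = k - h.toNat := ⟨_, rfl⟩
          have hmlt : m < avail.toNat := by omega
          have hmint : (m : Int) = (k : Int) - (h.toNat : Int) := by omega
          have hsplit : (List.replicate h.toNat (0:Int) ++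
              (pvFillA An (List.replicate avail.toNat 0) (avail / 4) ++
               List.replicate t.toNat 0))[k]!
              = (pvFillA An (List.replicate avail.toNat 0) (avail / 4))[m]! := by
            rw [getElem!_pos _ k (by simpa using hk1), List.getElem_append_right (by simp; omega),
              List.getElem_append_left (by simp [hfoldlen]; omega)]
            rw [getElem!_pos _ m (by rw [hfoldlen]; omega)]
            congr 1
            simp [hmdef]
          rw [hsplit]
          unfold pvFillA
          have hmain := pv_fold_get An (avail / 4) hq
            (PySem.List.pyRange 0 (PySem.List.len An) 1)
            (List.replicate avail.toNat 0) m (by rw [hLacc]; omega) ?hb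
          case hb =>
            intro j hj hgj
            rw [PySem.List.mem_pyRange_one] at hj
            refine ⟨hj.1, ?_⟩
            rcases hpre with hle | hall
            · rw [hfd] at hle; omega
            · have hjlen : j < (An.length : Int) := by
                have : PySem.List.len An = (An.length : Int) := by simp [PySem.List.len]
                rw [this] at hj; exact hj.2
              have hjt : (j.toNat : Int) = j := Int.toNat_of_nonneg hj.1
              have hg' : An[j.toNat]! = 1 := by
                have hlt : j.toNat < An.length := by omega
                rw [getElem!_pos An j.toNat hlt]
                rw [PySem.List.pyGetD_eq_getElem An 0 hj.1 (by omega)] at hgj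
                exact hgj
              have := hall j.toNat (by omega) hg'
              rw [hfd] at this
              rw [hLacc]
              calc j * (avail / 4) + avail / 4 = ((j.toNat : Int) + 1) * (avail / 4) := by
                    rw [hjt]; ring
                _ ≤ avail := this
                _ = ((avail.toNat : Int)) := by omega
          rw [hmain]
          have hacc0 : (List.replicate avail.toNat (0 : Int))[m]! = 0 := by
            rw [getElem!_pos _ m (by rw [hLacc]; omega), List.getElem_replicate]
          rw [hacc0]
          have hmeq : ((k : Int) - max h 0) = (m : Int) := by omega
          rw [if_neg (show ¬((k : Int) - max h 0 < 0 ∨ avail ≤ (k : Int) - max h 0 ∨ avail / 4 ≤ 0) by omega)]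
          rw [PySem.Int.floordiv_eq_ediv_of_pos hq]
          have hiff : (∃ j ∈ PySem.List.pyRange 0 (PySem.List.len An) 1,
              PySem.List.pyGetD An j 0 = 1 ∧ j * (avail / 4) ≤ (m : Int) ∧ (m : Int) < j * (avail / 4) + (avail / 4))
              ↔ (((k : Int) - max h 0) / (avail / 4) < (An.length : Int) ∧
                 PySem.List.pyGetD An (((k : Int) - max h 0) / (avail / 4)) 0 = 1) := by
            rw [hmeq]
            constructor
            · rintro ⟨j, hj, hgj, hlo, hhi⟩
              rw [PySem.List.mem_pyRange_one] at hj
              have hjlen : j < (An.length : Int) := by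
                have : PySem.List.len An = (An.length : Int) := by simp [PySem.List.len]
                rw [this] at hj; exact hj.2
              have hdivj : (m : Int) / (avail / 4) = j := by
                have hge : j ≤ (m : Int) / (avail / 4) := Int.le_ediv_iff_mul_le hq |>.mpr (by linarith)
                have hlt : (m : Int) / (avail / 4) < j + 1 := by
                  rw [Int.ediv_lt_iff_lt_mul hq]; linarith
                omega
              rw [hdivj]; exact ⟨hjlen, hgj⟩
            · rintro ⟨hlt, hgj⟩
              refine ⟨(m : Int) / (avail / 4), ?_, hgj, ?_, ?_⟩
              · rw [PySem.List.mem_pyRange_one]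
                constructor
                · exact Int.ediv_nonneg (by omega) (by omega)
                · have : PySem.List.len An = (An.length : Int) := by simp [PySem.List.len]
                  rw [this]; exact hlt
              · have := Int.emod_nonneg (m : Int) (by omega : (avail / 4) ≠ 0)
                have heq := Int.emod_add_ediv (m : Int) (avail / 4)
                nlinarith [heq, this]
              · have := Int.emod_lt_of_pos (m : Int) hq
                have heq := Int.emod_add_ediv (m : Int) (avail / 4)
                nlinarith [heq, this]
          by_cases hex : ∃ j ∈ PySem.List.pyRange 0 (PySem.List.len An) 1,
              PySem.List.pyGetD An j 0 = 1 ∧ j * (avail / 4) ≤ (m : Int) ∧ (m : Int) < j * (avail / 4) + (avail / 4)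
          · rw [if_pos hex, if_pos (hiff.mp hex)]
          · rw [if_neg hex, if_neg (fun hc => hex (hiff.mpr hc))]
        · -- tail zeros
          rw [getElem!_pos _ k (by simpa using hk1), List.getElem_append_right (by simp; omega),
            List.getElem_append_right (by simp [hfoldlen]; omega),
            List.getElem_replicate, if_pos (Or.inr (Or.inl (by omega)))]
  · -- q ≤ 0: avail ≤ 0, everything is zeros
    have havail : avail ≤ 0 := by nlinarith
    have hmid0 : avail.toNat = 0 := by omega
    have hmax0 : max avail 0 = 0 := by omega
    have hfill : pvFillA An (List.replicate avail.toNat 0) (avail / 4)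
        = [] := by
      unfold pvFillA
      rw [hmid0, List.replicate_zero]
      apply pv_foldl_fix
      intro a i
      rw [PySem.List.pyRange_one_eq_nil (by
        have : avail / 4 ≤ 0 := by omega
        nlinarith)]
      simp
    rw [hfill]
    have hzero : ∀ x ∈ PySem.List.pyRange 0 (max h 0 + max avail 0 + max t 0) 1,
        pvVal An (max h 0) avail (avail / 4) x = 0 := by
      intro x _
      unfold pvVal
      rw [if_pos]
      right; right
      omega
    rw [List.map_congr_left hzero]
    rw [List.map_const']
    rw [PySem.List.length_pyRange_one]
    rw [List.append_nil, ← List.replicate_add]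
    congr 1
    omega

-- ===== VERDICT (by name: the statement is the Claim_ definition above) =====
theorem reorderAllocation_spec : Claim_equal_reorderAllocation := by
  intro n An A _hdom hpre
  unfold Spec_reorderAllocation
  have h0 : 0 ≤ PySem.Int.mod A 4 := PySem.Int.mod_nonneg A (by norm_num)
  have h1 : PySem.Int.mod A 4 < 4 := PySem.Int.mod_lt A (by norm_num)
  have hf : PySem.Int.floordiv A 4 * 4 + PySem.Int.mod A 4 = A :=
    PySem.Int.floordiv_mul_add_mod A 4
  unfold Pre_reorderAllocation at hpre
  simp only [reorderAllocation, reorderAllocation_alt]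
  have hcase : PySem.Int.mod A 4 = 0 ∨ PySem.Int.mod A 4 = 1 ∨
      PySem.Int.mod A 4 = 2 ∨ PySem.Int.mod A 4 = 3 := by omega
  rcases hcase with he | he | he | he <;>
    rw [he] at hpre ⊢ <;>
    simp only [Int.reduceEq, reduceIte, add_zero, ← sub_eq_add_neg] at hpre ⊢ <;>
    (refine pv_core An _ _ _ ?_ hpre; omega)
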